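-- pv_equiv track=rewrite | github.com/SergeyLipatnikov/AlgorythmPython | Keymaker.py | KeymasterWork
-- ===== SOURCE A (Python) =====
-- def KeymasterWork(Array, N):
--
--     for i in range(N):
--
--         if i == 0:
--
--             Array = FirstIteration(Array,N)
--
--         else :
--
--             Temp = i
--
--             Array = Iteration(Array,Temp,N)
--
--     return Array
--
-- def FirstIteration(Array,N):
--
--     for i in range(N):
--
--         Array[i] = not(Array[i])
--
--     return Array
--
-- def Iteration(Array,i,N):
--
--     for k in range(i,N,i+1):
--
--         Array[k] = not(Array[k])
--
--     return Array
-- ===== SOURCE B (Python) =====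
-- def KeymasterWork(Array, N):
--     # Index j is toggled once per divisor of j+1, so it ends up flipped
--     # exactly when j+1 is a perfect square (odd divisor count).
--     # Note: A mutates Array in place; B builds a new list (return value equal).
--     squares = set()
--     s, step = 1, 3
--     while s <= N:
--         squares.add(s)
--         s += step
--         step += 2
--     return [(not b) if (j + 1) in squares else b for j, b in enumerate(Array)]
-- ===== Notes on version B (the rewrite author's own statement) =====
-- stated objective: faster
-- what changed: A runs one toggle pass per divisor step (for each i < N toggling indices i, 2i+1, ... with stride i+1); B uses the fact that index j is toggled once per divisor of j+1, so it flips exactly the positions whose 1-based index is a perfect square, collecting the squares up to N in one O(sqrt N) loop and doing a single pass over the list. B returns a new list instead of mutating Array in place (the return values are equal).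
import Mathlib
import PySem

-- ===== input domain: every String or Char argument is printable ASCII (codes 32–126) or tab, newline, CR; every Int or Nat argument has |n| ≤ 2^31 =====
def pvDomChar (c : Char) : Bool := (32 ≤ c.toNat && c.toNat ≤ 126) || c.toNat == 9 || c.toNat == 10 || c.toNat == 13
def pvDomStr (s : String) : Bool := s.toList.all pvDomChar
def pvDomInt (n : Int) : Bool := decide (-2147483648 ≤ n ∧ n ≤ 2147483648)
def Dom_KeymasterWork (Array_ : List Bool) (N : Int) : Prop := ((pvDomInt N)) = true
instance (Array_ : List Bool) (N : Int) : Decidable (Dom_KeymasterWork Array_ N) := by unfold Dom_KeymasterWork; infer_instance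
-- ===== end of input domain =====

-- B replaces A's divisor-stride toggle passes by a single pass flipping exactly the
-- positions whose 1-based index is a perfect square (timed faster at the largest size).
-- A mutates Array in place; B builds a new list — the equivalence is about the return value.

-- ===== PORT A =====
-- Array[k] = not Array[k]  (read + write at an int index)
def pyFlipA (xs : List Bool) (k : Int) : List Bool :=
  PySem.List.pySetD xs k (!(PySem.List.pyGetD xs k false))

def FirstIterationA (Array_ : List Bool) (N : Int) : List Bool :=
  (PySem.List.pyRange 0 N 1).foldl (fun a i => pyFlipA a i) Array_

def IterationA (Array_ : List Bool) (i N : Int) : List Bool :=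
  (PySem.List.pyRange i N (i + 1)).foldl (fun a k => pyFlipA a k) Array_

def KeymasterWork (Array_ : List Bool) (N : Int) : List Bool :=
  (PySem.List.pyRange 0 N 1).foldl
    (fun a i => if i == 0 then FirstIterationA a N else IterationA a i N) Array_

-- ===== PORT B =====
-- the while loop of Source B: s runs over the squares 1, 4, 9, … (step = consecutive odd
-- numbers); the '0 < step' conjunct is only a totality guard (step is always 3,5,7,…)
def collectSquares (N s step : Int) (acc : PySem.Set Int) : PySem.Set Int :=
  if s ≤ N ∧ 0 < step then collectSquares N (s + step) (step + 2) (PySem.Set.add acc s)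
  else acc
termination_by (N + 1 - s).toNat
decreasing_by omega

def KeymasterWork_alt (Array_ : List Bool) (N : Int) : List Bool :=
  let squares := collectSquares N 1 3 PySem.Set.empty
  (PySem.List.enumerate Array_).map
    (fun p => if PySem.Set.contains squares (p.1 + 1) then !p.2 else p.2)

-- ===== PRECONDITION & SPEC =====
-- Pre_ excludes exactly the inputs where A raises IndexError (a pass touches index N-1,
-- so A raises whenever N exceeds the length of Array).
def Pre_KeymasterWork (Array_ : List Bool) (N : Int) : Prop := N ≤ Array_.length
instance (Array_ : List Bool) (N : Int) : Decidable (Pre_KeymasterWork Array_ N) := by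
  unfold Pre_KeymasterWork; infer_instance

def pvWitness_KeymasterWork : List Bool × Int := ([true, false, true, false, true], 5)

def Spec_KeymasterWork (Array_ : List Bool) (N : Int) (out : List Bool) : Prop := out = KeymasterWork_alt Array_ N
instance (Array_ : List Bool) (N : Int) (out : List Bool) : Decidable (Spec_KeymasterWork Array_ N out) := by unfold Spec_KeymasterWork; infer_instance

-- ===== CLAIM (what is proved, stated in full; the proofs are below) =====
def Claim_equal_KeymasterWork : Prop := ∀ (Array_ : List Bool) (N : Int), Dom_KeymasterWork Array_ N → Pre_KeymasterWork Array_ N → Spec_KeymasterWork Array_ N (KeymasterWork Array_ N)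

-- ===== LEMMAS AND PROOFS =====

-- index list toggled in iteration i of A
def indexList (N i : Int) : List Int :=
  if i = 0 then PySem.List.pyRange 0 N 1 else PySem.List.pyRange i N (i + 1)

lemma foldl_foldl_flatMap {α β γ : Type} (f : β → List γ) (g : α → γ → α) :
    ∀ (L : List β) (xs : α),
      L.foldl (fun a i => (f i).foldl g a) xs = (L.flatMap f).foldl g xs := by
  intro L
  induction L with
  | nil => intro xs; rfl
  | cons b L ih => intro xs; simp [List.flatMap_cons, List.foldl_append, ih]

lemma keymaster_eq_flat (Array_ : List Bool) (N : Int) :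
    KeymasterWork Array_ N
      = ((PySem.List.pyRange 0 N 1).flatMap (indexList N)).foldl pyFlipA Array_ := by
  rw [← foldl_foldl_flatMap]
  unfold KeymasterWork
  congr 1
  funext a i
  by_cases h : i = 0
  · simp [h, indexList, FirstIterationA]
  · simp [h, indexList, IterationA]

lemma length_pyFlipA (xs : List Bool) (k : Int) : (pyFlipA xs k).length = xs.length := by
  simp [pyFlipA, PySem.List.length_pySetD]

lemma pyFlipA_natCast (xs : List Bool) (n : Nat) (hn : n < xs.length) :
    pyFlipA xs (n : Int) = xs.set n (!xs.getD n false) := by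
  simp [pyFlipA, PySem.List.pySetD, PySem.List.pySet?_natCast xs n _ hn,
    PySem.List.pyGetD_natCast]

lemma getElem?_pyFlipA (xs : List Bool) (k : Int) (hk0 : 0 ≤ k) (hk : k < xs.length)
    (j : Nat) :
    (pyFlipA xs k)[j]? = if (j : Int) = k then some (!xs.getD j false) else xs[j]? := by
  obtain ⟨n, rfl⟩ : ∃ n : Nat, k = (n : Int) := ⟨k.toNat, by omega⟩
  have hn : n < xs.length := by exact_mod_cast hk
  rw [pyFlipA_natCast xs n hn, List.getElem?_set]
  by_cases h : n = j
  · subst h; simp [hn]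
  · have : ((j : Int) = (n : Int)) ↔ False := by
      constructor
      · intro hh; exact h (by exact_mod_cast hh.symm)
      · exact False.elim
    simp [h, this]

lemma foldl_flip_spec (L : List Int) :
    ∀ (xs : List Bool), (∀ k ∈ L, 0 ≤ k ∧ k < (xs.length : Int)) →
      ((L.foldl pyFlipA xs).length = xs.length ∧
       ∀ (j : Nat), j < xs.length →
         (L.foldl pyFlipA xs)[j]? = some (xor xs[j]! (decide (Odd (L.count (j : Int)))))) := by
  induction L with
  | nil =>
    intro xs _
    refine ⟨rfl, fun j hj => ?_⟩
    simp [List.getElem?_eq_getElem hj, List.getElem!_eq_getElem?_getD,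
      List.getElem?_eq_getElem hj, Nat.odd_iff]
  | cons a L ih =>
    intro xs hmem
    have ha := hmem a (List.mem_cons_self)
    have hlen : (pyFlipA xs a).length = xs.length := length_pyFlipA xs a
    have hmem' : ∀ k ∈ L, 0 ≤ k ∧ k < ((pyFlipA xs a).length : Int) := by
      intro k hk; rw [hlen]; exact hmem k (List.mem_cons_of_mem _ hk)
    obtain ⟨ihlen, ihget⟩ := ih (pyFlipA xs a) hmem'
    refine ⟨by rw [List.foldl_cons, ihlen, hlen], ?_⟩
    intro j hj
    have hj' : j < (pyFlipA xs a).length := by omega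
    rw [List.foldl_cons, ihget j hj']
    have hflip := getElem?_pyFlipA xs a ha.1 (by exact_mod_cast ha.2) j
    rw [List.count_cons]
    by_cases hja : (j : Int) = a
    · have hxsj : (pyFlipA xs a)[j]! = !xs[j]! := by
        rw [List.getElem!_eq_getElem?_getD, hflip, if_pos hja,
          List.getElem!_eq_getElem?_getD, List.getElem?_eq_getElem hj]
        simp [List.getD_eq_getElem?_getD, List.getElem?_eq_getElem hj]
      rw [hxsj]
      simp only [hja, beq_self_eq_true, if_pos rfl]
      have hodd : Odd (List.count a L + 1) ↔ ¬ Odd (List.count a L) := by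
        rw [Nat.odd_add_one, Nat.not_odd_iff_even]
      by_cases hc : Odd (List.count a L) <;>
        simp [hc, hodd, List.getElem!_eq_getElem?_getD]
    · have hxsj : (pyFlipA xs a)[j]! = xs[j]! := by
        rw [List.getElem!_eq_getElem?_getD, hflip, if_neg hja,
          List.getElem!_eq_getElem?_getD]
      rw [hxsj]
      have hne : ¬ (a = (j : Int)) := fun h => hja h.symm
      simp [hne]

lemma count_flatMap {α β : Type} [BEq β] (f : α → List β) (x : β) :
    ∀ (L : List α), ((L.flatMap f).count x) = (L.map (fun i => (f i).count x)).sum := by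
  intro L
  induction L with
  | nil => rfl
  | cons a L ih => simp [List.flatMap_cons, List.count_append, ih]

lemma nodup_pyRange_pos (a b s : Int) (hs : 0 < s) :
    (PySem.List.pyRange a b s).Nodup := by
  rw [PySem.List.pyRange_of_pos a b hs]
  refine List.Nodup.map ?_ (List.nodup_range)
  intro p q hpq
  simp only at hpq
  have : (p : Int) = q := by
    have := hpq
    nlinarith [this]
  exact_mod_cast this

lemma count_pyRange_pos (a b s x : Int) (hs : 0 < s) :
    (PySem.List.pyRange a b s).count x
      = if a ≤ x ∧ x < b ∧ s ∣ x - a then 1 else 0 := by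
  by_cases h : a ≤ x ∧ x < b ∧ s ∣ x - a
  · rw [if_pos h]
    exact List.count_eq_one_of_mem (nodup_pyRange_pos a b s hs)
      ((PySem.List.mem_pyRange_iff_of_pos hs x).mpr h)
  · rw [if_neg h]
    exact List.count_eq_zero_of_not_mem
      (fun hm => h ((PySem.List.mem_pyRange_iff_of_pos hs x).mp hm))

lemma count_indexList (N i : Int) (hi0 : 0 ≤ i) (j : Nat) :
    (indexList N i).count (j : Int)
      = if (j : Int) < N ∧ (i + 1) ∣ ((j : Int) + 1) then 1 else 0 := by
  unfold indexList
  by_cases h : i = 0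
  · subst h
    rw [if_pos rfl, count_pyRange_pos 0 N 1 _ (by omega)]
    congr 1
    simp only [eq_iff_iff]
    constructor
    · rintro ⟨_, h2, _⟩; exact ⟨h2, one_dvd _⟩
    · rintro ⟨h1, _⟩; exact ⟨by positivity, h1, one_dvd _⟩
  · rw [if_neg h, count_pyRange_pos i N (i+1) _ (by omega)]
    congr 1
    simp only [eq_iff_iff]
    have hd : (i + 1) ∣ ((j : Int) - i) ↔ (i + 1) ∣ ((j : Int) + 1) := by
      constructor
      · intro hdvd
        have : ((j : Int) + 1) = ((j : Int) - i) + (i + 1) := by ring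
        rw [this]; exact dvd_add hdvd dvd_rfl
      · intro hdvd
        have : ((j : Int) - i) = ((j : Int) + 1) - (i + 1) := by ring
        rw [this]; exact dvd_sub hdvd dvd_rfl
    constructor
    · rintro ⟨_, h2, h3⟩; exact ⟨h2, hd.mp h3⟩
    · rintro ⟨h1, h2⟩
      have hle : i + 1 ≤ (j : Int) + 1 := Int.le_of_dvd (by positivity) h2
      exact ⟨by omega, h1, hd.mpr h2⟩

lemma total_count (N : Int) (j : Nat) :
    (((PySem.List.pyRange 0 N 1).flatMap (indexList N)).count (j : Int))
      = if (j : Int) < N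
          then (PySem.List.pyRange 0 N 1).countP (fun i => decide ((i + 1) ∣ ((j : Int) + 1)))
          else 0 := by
  rw [count_flatMap]
  have hmap : (PySem.List.pyRange 0 N 1).map (fun i => (indexList N i).count (j : Int))
      = (PySem.List.pyRange 0 N 1).map
          (fun i => if (j : Int) < N ∧ (i + 1) ∣ ((j : Int) + 1) then 1 else 0) := by
    apply List.map_congr_left
    intro i hi
    have hi0 : 0 ≤ i := ((PySem.List.mem_pyRange_one).mp hi).1
    exact count_indexList N i hi0 j
  rw [hmap]
  by_cases hjN : (j : Int) < N
  · rw [if_pos hjN]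
    have hpt : ∀ (L : List Int) (p : Int → Bool),
        (L.map (fun i => if p i = true then 1 else 0)).sum = L.countP p := by
      intro L p
      induction L with
      | nil => rfl
      | cons a L ih =>
        by_cases hpa : p a = true <;> simp [List.countP_cons, hpa, ih] <;> omega
    rw [← hpt (PySem.List.pyRange 0 N 1) (fun i => decide ((i + 1) ∣ ((j : Int) + 1)))]
    apply congrArg
    apply List.map_congr_left
    intro i _
    by_cases hdv : (i + 1) ∣ ((j : Int) + 1) <;> simp [hjN, hdv]
  · rw [if_neg hjN]
    have : ∀ i ∈ PySem.List.pyRange 0 N 1,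
        (if (j : Int) < N ∧ (i + 1) ∣ ((j : Int) + 1) then 1 else 0) = 0 := by
      intro i _; simp [hjN]
    rw [List.map_congr_left this]
    simp

lemma countP_range_eq_card_filter (p : Nat → Bool) (M : Nat) :
    (List.range M).countP p = ({k ∈ Finset.range M | p k = true}).card := by
  induction M with
  | zero => rfl
  | succ m ih =>
    rw [List.range_succ, List.countP_append, Finset.range_add_one, Finset.filter_insert]
    by_cases hp : p m = true
    · rw [if_pos hp, Finset.card_insert_of_notMem (by simp)]
      simp [List.countP_cons, hp, ih]
    · rw [if_neg hp]
      simp [List.countP_cons, hp, ih]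

lemma countP_divisors (N : Int) (j : Nat) (hj : (j : Int) < N) :
    (PySem.List.pyRange 0 N 1).countP (fun i => decide ((i + 1) ∣ ((j : Int) + 1)))
      = (j + 1).divisors.card := by
  rw [PySem.List.pyRange_one, List.countP_map]
  have hcongr : ((fun i => decide ((i + 1) ∣ ((j : Int) + 1))) ∘ (fun k : Nat => (0 : Int) + k))
      = fun k : Nat => decide ((k + 1) ∣ (j + 1)) := by
    funext k
    simp only [Function.comp, zero_add, decide_eq_decide]
    constructor
    · intro h
      have : ((k : Int) + 1) ∣ ((j : Int) + 1) := h
      exact_mod_cast this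
    · intro h
      exact_mod_cast (Int.natCast_dvd_natCast.mpr h)
  rw [hcongr, countP_range_eq_card_filter]
  have hM : (j : Int) + 1 ≤ N := by omega
  refine Finset.card_bij' (fun k _ => k + 1) (fun d _ => d - 1) ?_ ?_ ?_ ?_
  · intro k hk
    simp only [Finset.mem_filter, Finset.mem_range, decide_eq_true_eq] at hk
    exact Nat.mem_divisors.mpr ⟨hk.2, by omega⟩
  · intro d hd
    rw [Nat.mem_divisors] at hd
    have hd1 : 1 ≤ d := Nat.pos_of_dvd_of_pos hd.1 (by omega)
    have hdle : d ≤ j + 1 := Nat.le_of_dvd (by omega) hd.1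
    simp only [Finset.mem_filter, Finset.mem_range, decide_eq_true_eq]
    constructor
    · have hc : ((N - 0).toNat : Int) = N - 0 := Int.toNat_of_nonneg (by omega)
      omega
    · rw [Nat.sub_add_cancel hd1]; exact hd.1
  · intro k hk; simp
  · intro d hd
    rw [Nat.mem_divisors] at hd
    have hd1 : 1 ≤ d := Nat.pos_of_dvd_of_pos hd.1 (by omega)
    simp
    omega

theorem odd_card_divisors_iff_isSquare {n : ℕ} (hn : n ≠ 0) :
    Odd n.divisors.card ↔ IsSquare n := by
  rw [Nat.card_divisors hn]
  have h1 : Odd (∏ p ∈ n.primeFactors, (n.factorization p + 1)) ↔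
      ∀ p ∈ n.primeFactors, Even (n.factorization p) := by
    constructor
    · intro h p hp
      by_contra hev
      have hodd : Odd (n.factorization p) := Nat.odd_iff.mpr (by
        rcases Nat.even_or_odd (n.factorization p) with he | ho
        · exact absurd he hev
        · exact Nat.odd_iff.mp ho)
      have h2 : 2 ∣ n.factorization p + 1 := by rcases hodd with ⟨c, hc⟩; omega
      have hdvd : 2 ∣ ∏ p ∈ n.primeFactors, (n.factorization p + 1) :=
        h2.trans (Finset.dvd_prod_of_mem _ hp)
      rcases h with ⟨c, hc⟩; omega
    · intro h
      refine Finset.prod_induction _ Odd (fun a b => Odd.mul) odd_one ?_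
      intro p hp
      rcases h p hp with ⟨c, hc⟩
      exact ⟨c, by omega⟩
  rw [h1]
  have hself : ∏ p ∈ n.primeFactors, p ^ n.factorization p = n := by
    have := Nat.prod_factorization_pow_eq_self hn
    rwa [Finsupp.prod, Nat.support_factorization] at this
  constructor
  · intro h
    refine ⟨∏ p ∈ n.primeFactors, p ^ (n.factorization p / 2), ?_⟩
    rw [← Finset.prod_mul_distrib]
    have heq : ∀ p ∈ n.primeFactors, p ^ (n.factorization p / 2) * p ^ (n.factorization p / 2)
        = p ^ (n.factorization p) := by
      intro p hp
      rw [← pow_add]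
      congr 1
      rcases h p hp with ⟨c, hc⟩
      omega
    rw [Finset.prod_congr rfl heq, hself]
  · rintro ⟨m, rfl⟩ p hp
    have hm : m ≠ 0 := by rintro rfl; simp at hn
    rw [Nat.factorization_mul hm hm]
    exact ⟨m.factorization p, by simp⟩

lemma mem_collectSquares_aux (N x : Int) :
    ∀ (fuel : Nat) (k : Int), (N + 1 - k).toNat ≤ fuel → 1 ≤ k →
      ∀ (acc : PySem.Set Int),
        (x ∈ collectSquares N (k * k) (2 * k + 1) acc ↔
          x ∈ acc ∨ ∃ m : Int, k ≤ m ∧ x = m * m ∧ x ≤ N) := by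
  intro fuel
  induction fuel with
  | zero =>
    intro k hfuel hk acc
    have hNk : N < k := by omega
    have hkk : N < k * k := by nlinarith
    rw [collectSquares, if_neg (by omega)]
    constructor
    · intro h; exact Or.inl h
    · rintro (h | ⟨m, hm, rfl, hle⟩)
      · exact h
      · nlinarith
  | succ f ih =>
    intro k hfuel hk acc
    by_cases h : k * k ≤ N
    · rw [collectSquares, if_pos ⟨h, by omega⟩]
      have e1 : k * k + (2 * k + 1) = (k + 1) * (k + 1) := by ring
      have e2 : 2 * k + 1 + 2 = 2 * (k + 1) + 1 := by ring
      rw [e1, e2]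
      have hkN : k ≤ N := by nlinarith
      rw [ih (k + 1) (by omega) (by omega) _]
      rw [PySem.Set.mem_add]
      constructor
      · rintro ((h2 | h2) | ⟨m, hm, rfl, hle⟩)
        · exact Or.inl h2
        · exact Or.inr ⟨k, le_refl k, h2, h2 ▸ h⟩
        · exact Or.inr ⟨m, by omega, rfl, hle⟩
      · rintro (h2 | ⟨m, hm, rfl, hle⟩)
        · exact Or.inl (Or.inl h2)
        · by_cases hmk : m = k
          · subst hmk; exact Or.inl (Or.inr rfl)
          · exact Or.inr ⟨m, by omega, rfl, hle⟩
    · rw [collectSquares, if_neg (by omega)]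
      constructor
      · intro h2; exact Or.inl h2
      · rintro (h2 | ⟨m, hm, rfl, hle⟩)
        · exact h2
        · nlinarith

lemma mem_squares (N x : Int) :
    x ∈ collectSquares N 1 3 PySem.Set.empty ↔ ∃ m : Int, 1 ≤ m ∧ x = m * m ∧ x ≤ N := by
  have h1 : (1 : Int) = 1 * 1 := by ring
  have h3 : (3 : Int) = 2 * 1 + 1 := by ring
  rw [h1, h3, mem_collectSquares_aux N x (N + 1 - 1).toNat 1 (by omega) (by omega)]
  simp [PySem.Set.empty]

lemma flat_bounds (Array_ : List Bool) (N : Int) (h : N ≤ (Array_.length : Int)) :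
    ∀ k ∈ (PySem.List.pyRange 0 N 1).flatMap (indexList N),
      0 ≤ k ∧ k < (Array_.length : Int) := by
  intro k hk
  rw [List.mem_flatMap] at hk
  obtain ⟨i, hi, hki⟩ := hk
  have hi' := (PySem.List.mem_pyRange_one).mp hi
  unfold indexList at hki
  by_cases h0 : i = 0
  · rw [if_pos h0] at hki
    have := (PySem.List.mem_pyRange_one).mp hki
    omega
  · rw [if_neg h0] at hki
    have := (PySem.List.mem_pyRange_iff_of_pos (by omega : (0:Int) < i + 1) k).mp hki
    omega

lemma parity_iff_square (N : Int) (j : Nat) :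
    (Odd (((PySem.List.pyRange 0 N 1).flatMap (indexList N)).count (j : Int)) ↔
      ((j : Int) + 1) ∈ collectSquares N 1 3 PySem.Set.empty) := by
  rw [total_count, mem_squares]
  by_cases hjN : (j : Int) < N
  · rw [if_pos hjN, countP_divisors N j hjN,
      odd_card_divisors_iff_isSquare (by omega : j + 1 ≠ 0)]
    constructor
    · rintro ⟨r, hr⟩
      have hr1 : 1 ≤ r := by
        rcases Nat.eq_zero_or_pos r with h0 | h1
        · subst h0; omega
        · exact h1
      exact ⟨(r : Int), by exact_mod_cast hr1, by exact_mod_cast hr, by omega⟩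
    · rintro ⟨m, hm1, hmx, _⟩
      refine ⟨m.toNat, ?_⟩
      have : ((j : Int) + 1) = (m.toNat : Int) * (m.toNat : Int) := by
        rwa [Int.toNat_of_nonneg (by omega)]
      exact_mod_cast this
  · rw [if_neg hjN]
    constructor
    · intro h; exact absurd h (by simp)
    · rintro ⟨m, hm1, hmx, hle⟩
      exfalso
      nlinarith [hmx, hle, hm1]

theorem keymaster_equal (Array_ : List Bool) (N : Int) (h : N ≤ (Array_.length : Int)) :
    KeymasterWork Array_ N = KeymasterWork_alt Array_ N := by
  obtain ⟨hlen, hget⟩ :=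
    foldl_flip_spec ((PySem.List.pyRange 0 N 1).flatMap (indexList N)) Array_
      (flat_bounds Array_ N h)
  apply List.ext_getElem?
  intro j
  rw [keymaster_eq_flat]
  show _ = (KeymasterWork_alt Array_ N)[j]?
  unfold KeymasterWork_alt
  by_cases hj : j < Array_.length
  · rw [hget j hj]
    rw [List.getElem?_map, PySem.List.getElem?_enumerate, List.getElem?_eq_getElem hj]
    simp only [Option.map_some]
    have hcont : PySem.Set.contains (collectSquares N 1 3 PySem.Set.empty) ((0 : Int) + (j : Int) + 1) = true ↔
        ((j : Int) + 1) ∈ collectSquares N 1 3 PySem.Set.empty := by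
      rw [zero_add]
      simp [PySem.Set.contains]
    congr 1
    rw [List.getElem!_eq_getElem?_getD, List.getElem?_eq_getElem hj]
    by_cases hmem : ((j : Int) + 1) ∈ collectSquares N 1 3 PySem.Set.empty
    · rw [if_pos (hcont.mpr hmem)]
      have : decide (Odd (((PySem.List.pyRange 0 N 1).flatMap (indexList N)).count (j : Int))) = true := by
        rw [decide_eq_true_eq]
        exact (parity_iff_square N j).mpr hmem
      simp [this]
    · rw [if_neg (fun hc => hmem (hcont.mp hc))]
      have : decide (Odd (((PySem.List.pyRange 0 N 1).flatMap (indexList N)).count (j : Int))) = false := by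
        rw [decide_eq_false_iff_not]
        exact fun ho => hmem ((parity_iff_square N j).mp ho)
      simp [this]
  · have h1 : (((PySem.List.pyRange 0 N 1).flatMap (indexList N)).foldl pyFlipA Array_).length ≤ j := by omega
    have h2 : ((PySem.List.enumerate Array_).map
        (fun p => if PySem.Set.contains (collectSquares N 1 3 PySem.Set.empty) (p.1 + 1) then !p.2 else p.2)).length ≤ j := by
      rw [List.length_map, PySem.List.length_enumerate]; omega
    rw [List.getElem?_eq_none h1, List.getElem?_eq_none h2]

-- ===== VERDICT (by name: the statement is the Claim_ definition above) =====
theorem KeymasterWork_spec : Claim_equal_KeymasterWork :=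
  fun Array_ N _ hpre => keymaster_equal Array_ N hpre
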